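-- pv_equiv track=rewrite | github.com/jimhorng/algorithm | min_cpu_run_task/prob3_sol4.py | prob3
-- ===== SOURCE A (Python) =====
-- def _feasible_with_k(tasks: list[tuple[int, int]], task_length: int, num_cpus: int) -> bool:
--     """
--     Hall's condition for identical-job parallel machine scheduling.
--
--     tasks : list of (release_time, latest_start).
--     Returns True iff, for every interval [a, b) formed by critical points,
--     the number of tasks contained within it does not exceed
--     num_cpus * floor((b - a) / task_length).
--     """
--     releases = [r for r, _ in tasks]
--     deadlines = [ls + task_length for _, ls in tasks]
--     critical = sorted(set(releases + deadlines))
--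
--     for ai, a in enumerate(critical):
--         for b in critical[ai + 1:]:
--             capacity = num_cpus * ((b - a) // task_length)
--             demand = sum(1 for r, d in zip(releases, deadlines) if r >= a and d <= b)
--             if demand > capacity:
--                 return False
--     return True
--
-- def prob3(start_times: list[int], task_length: int, deadlines: list[int]) -> int:
--     """
--     Return the minimum number of CPUs required so that each task finishes
--     by its own deadline, or -1 if impossible.
--     """
--     n = len(start_times)
--     if n == 0:
--         return 0
--
--     tasks: list[tuple[int, int]] = []
--     for start_time, deadline in zip(start_times, deadlines):
--         latest_start = deadline - task_length
--         if latest_start < start_time: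
--             return -1
--         tasks.append((start_time, latest_start))
--
--     left, right = 1, n
--     while left < right:
--         mid = (left + right) // 2
--         if _feasible_with_k(tasks, task_length, mid):
--             right = mid
--         else:
--             left = mid + 1
--
--     return left
-- ===== SOURCE B (Python) =====
-- def _min_k(lo, hi, pred):
--     """Smallest value in [lo, hi] accepted by pred (pred assumed monotone), recursively."""
--     if lo >= hi:
--         return lo
--     mid = (lo + hi) // 2
--     return _min_k(lo, mid, pred) if pred(mid) else _min_k(mid + 1, hi, pred)
--
-- def _feasible_fast(tasks, task_length, pts, num_cpus):
--     """Hall's condition over critical points; for each left end a, the demand of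
--     [a, b) is accumulated with one pointer over the sorted deadlines instead of
--     being recounted for every pair."""
--     for i, a in enumerate(pts):
--         ds = sorted(d for r, d in tasks if r >= a)
--         j = 0
--         for b in pts[i + 1:]:
--             while j < len(ds) and ds[j] <= b:
--                 j += 1
--             if j > num_cpus * ((b - a) // task_length):
--                 return False
--     return True
--
-- def prob3(start_times, task_length, deadlines):
--     n = len(start_times)
--     if n == 0:
--         return 0
--     if any(d - task_length < s for s, d in zip(start_times, deadlines)):
--         return -1
--     tasks = [(s, d) for s, d in zip(start_times, deadlines)]  # (release, deadline)
--     pts = sorted({s for s, d in tasks} | {d for s, d in tasks})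
--     return _min_k(1, n, lambda k: _feasible_fast(tasks, task_length, pts, k))
-- ===== Notes on version B (the rewrite author's own statement) =====
-- stated objective: alternative
-- what changed: The Hall-condition feasibility check no longer rescans all tasks for every pair of critical points: for each left critical point the deadlines of the released tasks are sorted once and a single pointer sweeps them over the increasing right endpoints, accumulating the demand count; the binary search over the CPU count is kept but written as a recursive helper and the -1 pre-check as an any() comprehension.
import Mathlib
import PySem

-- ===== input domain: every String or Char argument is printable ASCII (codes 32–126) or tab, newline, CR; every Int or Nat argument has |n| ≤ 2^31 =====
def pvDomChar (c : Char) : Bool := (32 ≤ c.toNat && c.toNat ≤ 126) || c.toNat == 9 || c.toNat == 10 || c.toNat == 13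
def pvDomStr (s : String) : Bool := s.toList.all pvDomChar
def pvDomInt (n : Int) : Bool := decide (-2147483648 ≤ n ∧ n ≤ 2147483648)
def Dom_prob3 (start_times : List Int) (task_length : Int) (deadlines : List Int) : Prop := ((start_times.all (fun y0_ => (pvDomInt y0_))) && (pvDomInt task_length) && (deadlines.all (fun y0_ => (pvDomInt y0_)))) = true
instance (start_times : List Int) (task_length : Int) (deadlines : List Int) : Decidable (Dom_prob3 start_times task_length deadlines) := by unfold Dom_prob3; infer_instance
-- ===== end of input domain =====

-- B restructures A's Hall-condition check: instead of rescanning all tasks for every pair of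
-- critical points, for each left critical point one pointer sweeps the sorted deadlines over
-- the increasing right endpoints, accumulating the demand count (the binary search over the
-- CPU count is kept, written recursively): alternative algorithm, same return value.

-- ===== PORT A =====

-- inner loop `for b in critical[ai+1:]` of _feasible_with_k (early `return False` = stop)
def feasAInner (releases deadlines : List Int) (task_length num_cpus a : Int) : List Int → Bool
  | [] => true
  | b :: bs =>
    let capacity := num_cpus * PySem.Int.floordiv (b - a) task_length
    let demand : Int := ((releases.zip deadlines).countP (fun p => decide (p.1 ≥ a) && decide (p.2 ≤ b)) : Int)
    if demand > capacity then false
    else feasAInner releases deadlines task_length num_cpus a bs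

-- outer loop `for ai, a in enumerate(critical)`: the remaining list is critical[ai+1:]
def feasAOuter (releases deadlines : List Int) (task_length num_cpus : Int) : List Int → Bool
  | [] => true
  | a :: rest =>
    feasAInner releases deadlines task_length num_cpus a rest &&
      feasAOuter releases deadlines task_length num_cpus rest

def feasibleWithK (tasks : List (Int × Int)) (task_length num_cpus : Int) : Bool :=
  let releases := tasks.map (fun p => p.1)
  let deadlines := tasks.map (fun p => p.2 + task_length)
  let critical := PySem.List.sorted (PySem.Set.ofList (releases ++ deadlines)) (fun x => x) false
  feasAOuter releases deadlines task_length num_cpus critical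

-- the task-building loop of prob3 (early `return -1` = none)
def buildTasksA (task_length : Int) (acc : List (Int × Int)) : List (Int × Int) → Option (List (Int × Int))
  | [] => some acc
  | (s, d) :: rest =>
    let latest_start := d - task_length
    if latest_start < s then none
    else buildTasksA task_length (acc ++ [(s, latest_start)]) rest

-- the `while left < right` binary-search loop
def bsearchA (tasks : List (Int × Int)) (task_length : Int) (left right : Int) : Int :=
  if h : left < right then
    let mid := PySem.Int.floordiv (left + right) 2
    if feasibleWithK tasks task_length mid then bsearchA tasks task_length left mid
    else bsearchA tasks task_length (mid + 1) right
  else left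
termination_by (right - left).toNat
decreasing_by
  · have := PySem.Int.floordiv_two_mid_bounds (le_of_lt h)
    have h2 : PySem.Int.floordiv (left + right) 2 < right := by
      rw [PySem.Int.floordiv_lt_iff_lt_mul (by norm_num)]; omega
    omega
  · have := PySem.Int.floordiv_two_mid_bounds (le_of_lt h)
    omega

def prob3 (start_times : List Int) (task_length : Int) (deadlines : List Int) : Int :=
  let n := start_times.length
  if n = 0 then 0
  else
    match buildTasksA task_length [] (start_times.zip deadlines) with
    | none => -1
    | some tasks => bsearchA tasks task_length 1 (n : Int)

-- ===== PORT B =====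

-- `while j < len(ds) and ds[j] <= b: j += 1`
def advancePtr (ds : List Int) (b : Int) (j : Nat) : Nat :=
  if h : j < ds.length then
    if ds[j] ≤ b then advancePtr ds b (j + 1) else j
  else j
termination_by ds.length - j

-- `for b in pts[i+1:]` of _feasible_fast, with the accumulated pointer j
def feasBInner (ds : List Int) (task_length num_cpus a : Int) (j : Nat) : List Int → Bool
  | [] => true
  | b :: bs =>
    let j' := advancePtr ds b j
    if (j' : Int) > num_cpus * PySem.Int.floordiv (b - a) task_length then false
    else feasBInner ds task_length num_cpus a j' bs

-- `for i, a in enumerate(pts)` of _feasible_fast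
def feasBOuter (tasks : List (Int × Int)) (task_length num_cpus : Int) : List Int → Bool
  | [] => true
  | a :: rest =>
    let ds := PySem.List.sorted ((tasks.filter (fun p => decide (p.1 ≥ a))).map (fun p => p.2)) (fun x => x) false
    feasBInner ds task_length num_cpus a 0 rest &&
      feasBOuter tasks task_length num_cpus rest

-- the recursive binary search `_min_k`
def minK (tasks : List (Int × Int)) (task_length : Int) (pts : List Int) (lo hi : Int) : Int :=
  if h : lo ≥ hi then lo
  else
    let mid := PySem.Int.floordiv (lo + hi) 2
    if feasBOuter tasks task_length mid pts then minK tasks task_length pts lo mid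
    else minK tasks task_length pts (mid + 1) hi
termination_by (hi - lo).toNat
decreasing_by
  · have := PySem.Int.floordiv_two_mid_bounds (le_of_lt (lt_of_not_ge h))
    have h2 : PySem.Int.floordiv (lo + hi) 2 < hi := by
      rw [PySem.Int.floordiv_lt_iff_lt_mul (by norm_num)]; omega
    omega
  · have := PySem.Int.floordiv_two_mid_bounds (le_of_lt (lt_of_not_ge h))
    omega

def prob3_alt (start_times : List Int) (task_length : Int) (deadlines : List Int) : Int :=
  let n := start_times.length
  if n = 0 then 0
  else if (start_times.zip deadlines).any (fun p => decide (p.2 - task_length < p.1)) then -1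
  else
    let tasks := (start_times.zip deadlines).map (fun p => (p.1, p.2))
    let pts := PySem.List.sorted
      (PySem.Set.union (PySem.Set.ofList (tasks.map (fun p => p.1))) (tasks.map (fun p => p.2)))
      (fun x => x) false
    minK tasks task_length pts 1 (n : Int)

-- ===== PRECONDITION & SPEC =====
-- Pre_ excludes exactly the inputs on which A raises ZeroDivisionError: task_length = 0 with at
-- least two start times, a nonempty zip, no infeasible pair (which would return -1 first) and at
-- least two distinct critical time points (B raises there as well).
def Pre_prob3 (start_times : List Int) (task_length : Int) (deadlines : List Int) : Prop :=
  task_length = 0 → 2 ≤ start_times.length →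
    (start_times.zip deadlines = [] ∨
     (∃ p ∈ start_times.zip deadlines, p.2 < p.1) ∨
     (∀ p ∈ start_times.zip deadlines, p.1 = start_times.headD 0 ∧ p.2 = start_times.headD 0))
instance (start_times : List Int) (task_length : Int) (deadlines : List Int) : Decidable (Pre_prob3 start_times task_length deadlines) := by unfold Pre_prob3; infer_instance

def pvWitness_prob3 : List Int × Int × List Int := ([0, 1], 2, [3, 4])

def Spec_prob3 (start_times : List Int) (task_length : Int) (deadlines : List Int) (out : Int) : Prop := out = prob3_alt start_times task_length deadlines
instance (start_times : List Int) (task_length : Int) (deadlines : List Int) (out : Int) : Decidable (Spec_prob3 start_times task_length deadlines out) := by unfold Spec_prob3; infer_instance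

-- ===== CLAIM (what is proved, stated in full; the proofs are below) =====
def Claim_equal_prob3 : Prop := ∀ (start_times : List Int) (task_length : Int) (deadlines : List Int), Dom_prob3 start_times task_length deadlines → Pre_prob3 start_times task_length deadlines → Spec_prob3 start_times task_length deadlines (prob3 start_times task_length deadlines)

-- ===== LEMMAS AND PROOFS =====

-- In a ≤-sorted list, an element is ≤ b exactly when its index is below the count of elements ≤ b.
theorem cnt_char {ds : List Int} (hs : ds.Pairwise (· ≤ ·)) (b : Int) :
    ∀ i (h : i < ds.length), (ds[i] ≤ b ↔ i < ds.countP (fun x => decide (x ≤ b))) := by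
  induction ds with
  | nil => intro i h; simp at h
  | cons x t ih =>
    rw [List.pairwise_cons] at hs
    intro i h
    cases i with
    | zero =>
      simp only [List.getElem_cons_zero, List.countP_cons]
      by_cases hx : x ≤ b
      · simp [hx]
      · constructor
        · intro hc; exact absurd hc hx
        · intro hc
          exfalso
          have : t.countP (fun x => decide (x ≤ b)) = 0 := by
            rw [List.countP_eq_zero]
            intro y hy
            simp only [decide_eq_true_eq]
            intro hyb
            exact hx (le_trans (hs.1 y hy) hyb)
          simp [hx, this] at hc
    | succ i =>
      simp only [List.getElem_cons_succ, List.countP_cons]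
      by_cases hx : x ≤ b
      · rw [ih hs.2 i (by simpa using h)]
        simp [hx]
      · have ht : t.countP (fun x => decide (x ≤ b)) = 0 := by
          rw [List.countP_eq_zero]
          intro y hy
          simp only [decide_eq_true_eq]
          intro hyb
          exact hx (le_trans (hs.1 y hy) hyb)
        have := ih hs.2 i (by simpa using h)
        simp [hx, ht] at this ⊢
        omega

-- the advancing pointer lands exactly on the count of elements ≤ b
theorem advancePtr_eq {ds : List Int} (hs : ds.Pairwise (· ≤ ·)) (b : Int) (j : Nat)
    (hj : j ≤ ds.countP (fun x => decide (x ≤ b))) :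
    advancePtr ds b j = ds.countP (fun x => decide (x ≤ b)) := by
  fun_induction advancePtr ds b j with
  | case1 j h hb ih =>
    exact ih (by have := (cnt_char hs b j h).mp hb; omega)
  | case2 j h hb =>
    have := (cnt_char hs b j h)
    have hle := List.countP_le_length (l := ds) (p := fun x => decide (x ≤ b))
    omega
  | case3 j h =>
    have hle := List.countP_le_length (l := ds) (p := fun x => decide (x ≤ b))
    omega

-- B's per-a sorted deadline list
def dsOf (z : List (Int × Int)) (a : Int) : List Int :=
  PySem.List.sorted ((z.filter (fun p => decide (p.1 ≥ a))).map (fun p => p.2)) (fun x => x) false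

theorem dsOf_pairwise (z : List (Int × Int)) (a : Int) : (dsOf z a).Pairwise (· ≤ ·) := by
  have := PySem.List.sorted_pairwise (xs := (z.filter (fun p => decide (p.1 ≥ a))).map (fun p => p.2)) (key := fun x => x)
  simpa using this

-- B's pointer count equals A's per-pair demand rescan
theorem cnt_eq_demand (z : List (Int × Int)) (a b : Int) :
    (dsOf z a).countP (fun x => decide (x ≤ b)) =
      ((z.map (fun p => p.1)).zip (z.map (fun p => p.2))).countP (fun p => decide (p.1 ≥ a) && decide (p.2 ≤ b)) := by
  rw [List.zip_map']
  unfold dsOf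
  rw [(PySem.List.sorted_perm _ _ _).countP_eq]
  rw [List.countP_map, List.countP_filter, List.countP_map]
  congr 1
  funext p
  simp only [Function.comp]
  cases p with
  | mk x y => simp [Bool.and_comm]

theorem inner_eq (z : List (Int × Int)) (L k a : Int) :
    ∀ (bs : List Int), bs.Pairwise (· ≤ ·) →
    ∀ (j : Nat), (∀ b ∈ bs, j ≤ (dsOf z a).countP (fun x => decide (x ≤ b))) →
    feasBInner (dsOf z a) L k a j bs =
      feasAInner (z.map (fun p => p.1)) (z.map (fun p => p.2)) L k a bs := by
  intro bs
  induction bs with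
  | nil => intro _ _ _; rfl
  | cons b bs ih =>
    intro hp j hj
    rw [List.pairwise_cons] at hp
    have hadv : advancePtr (dsOf z a) b j = (dsOf z a).countP (fun x => decide (x ≤ b)) :=
      advancePtr_eq (dsOf_pairwise z a) b j (hj b (by simp))
    simp only [feasBInner, feasAInner, hadv, cnt_eq_demand z a b]
    split
    · rfl
    · exact ih hp.2 _ (by
        intro b' hb'
        rw [← cnt_eq_demand z a b]
        exact List.countP_mono_left (by
          intro x _ hx
          simp only [decide_eq_true_eq] at hx ⊢
          exact le_trans hx (hp.1 b' hb')))

theorem outer_eq (z : List (Int × Int)) (L k : Int) :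
    ∀ pts : List Int, pts.Pairwise (· ≤ ·) →
    feasAOuter (z.map (fun p => p.1)) (z.map (fun p => p.2)) L k pts = feasBOuter z L k pts := by
  intro pts
  induction pts with
  | nil => intro _; rfl
  | cons a rest ih =>
    intro hp
    rw [List.pairwise_cons] at hp
    show (feasAInner _ _ L k a rest && feasAOuter _ _ L k rest) = (feasBInner (dsOf z a) L k a 0 rest && feasBOuter z L k rest)
    rw [inner_eq z L k a rest hp.2 0 (by intro _ _; exact Nat.zero_le _), ih hp.2]

-- sorted(set(rel + dls)) = sorted(set(rel) | set(dls))
theorem critical_eq (z : List (Int × Int)) :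
    PySem.List.sorted (PySem.Set.ofList ((z.map (fun p => p.1)) ++ (z.map (fun p => p.2)))) (fun x => x) false
      = PySem.List.sorted (PySem.Set.union (PySem.Set.ofList (z.map (fun p => p.1))) (z.map (fun p => p.2))) (fun x => x) false := by
  apply PySem.List.sorted_eq_sorted_of_perm _ _ _ (fun a b h => h)
  rw [List.perm_ext_iff_of_nodup (PySem.Set.nodup_ofList _) (PySem.Set.nodup_union _ _ (PySem.Set.nodup_ofList _))]
  intro x
  simp [PySem.Set.mem_ofList, PySem.Set.mem_union]

-- A's building loop = B's any-check plus comprehension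
theorem buildTasksA_eq (L : Int) : ∀ (z : List (Int × Int)) (acc : List (Int × Int)),
    buildTasksA L acc z = if z.any (fun p => decide (p.2 - L < p.1)) then none
      else some (acc ++ z.map (fun p => (p.1, p.2 - L))) := by
  intro z
  induction z with
  | nil => intro acc; simp [buildTasksA]
  | cons p rest ih =>
    intro acc
    obtain ⟨s, d⟩ := p
    simp only [buildTasksA, List.any_cons]
    by_cases h : d - L < s
    · simp [h]
    · rw [ih]
      simp only [h, decide_false, Bool.false_or, if_false, List.map_cons, List.append_assoc,
        List.singleton_append]

-- the two binary searches agree once the feasibility tests agree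
theorem search_eq (ta : List (Int × Int)) (z : List (Int × Int)) (L : Int) (pts : List Int)
    (hfe : ∀ k, feasibleWithK ta L k = feasBOuter z L k pts) :
    ∀ lo hi : Int, bsearchA ta L lo hi = minK z L pts lo hi := by
  intro lo hi
  fun_induction bsearchA ta L lo hi with
  | case1 lo hi h mid hf ih =>
    rw [minK, dif_neg (by omega)]
    show bsearchA ta L lo mid =
      if feasBOuter z L (PySem.Int.floordiv (lo + hi) 2) pts = true
      then minK z L pts lo (PySem.Int.floordiv (lo + hi) 2)
      else minK z L pts (PySem.Int.floordiv (lo + hi) 2 + 1) hi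
    rw [← hfe, if_pos hf]
    exact ih
  | case2 lo hi h mid hf ih =>
    rw [minK, dif_neg (by omega)]
    show bsearchA ta L (mid + 1) hi =
      if feasBOuter z L (PySem.Int.floordiv (lo + hi) 2) pts = true
      then minK z L pts lo (PySem.Int.floordiv (lo + hi) 2)
      else minK z L pts (PySem.Int.floordiv (lo + hi) 2 + 1) hi
    rw [← hfe, if_neg hf]
    exact ih
  | case3 lo hi h =>
    rw [minK, dif_pos (by omega)]

theorem map_eta (z : List (Int × Int)) : z.map (fun p => (p.1, p.2)) = z := by simp

theorem hfe_lemma (z : List (Int × Int)) (L k : Int) :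
    feasibleWithK (z.map (fun p => (p.1, p.2 - L))) L k =
      feasBOuter z L k (PySem.List.sorted
        (PySem.Set.union (PySem.Set.ofList (z.map (fun p => p.1))) (z.map (fun p => p.2)))
        (fun x => x) false) := by
  unfold feasibleWithK
  simp only [List.map_map]
  have h1 : z.map ((fun p : Int × Int => p.1) ∘ (fun p => (p.1, p.2 - L))) = z.map (fun p => p.1) := rfl
  have h2 : z.map ((fun p : Int × Int => p.2 + L) ∘ (fun p => (p.1, p.2 - L))) = z.map (fun p => p.2) := by
    apply List.map_congr_left
    intro p _
    simp only [Function.comp_apply]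
    ring
  rw [h1, h2, critical_eq]
  apply outer_eq
  have := PySem.List.sorted_pairwise
    (xs := PySem.Set.union (PySem.Set.ofList (z.map (fun p => p.1))) (z.map (fun p => p.2)))
    (key := fun x => x)
  simpa using this

-- the equality in fact holds for every input
theorem main_eq : ∀ (s : List Int) (L : Int) (d : List Int), prob3 s L d = prob3_alt s L d := by
  intro s L d
  unfold prob3 prob3_alt
  by_cases hn : s.length = 0
  · simp [hn]
  · simp only [hn, if_false]
    rw [buildTasksA_eq, map_eta]
    by_cases ha : (s.zip d).any (fun p => decide (p.2 - L < p.1))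
    · simp [ha]
    · simp only [ha, if_false, Bool.false_eq_true, List.nil_append]
      apply search_eq
      intro k
      exact hfe_lemma (s.zip d) L k

-- ===== VERDICT (by name: the statement is the Claim_ definition above) =====
theorem prob3_spec : Claim_equal_prob3 := by
  intro s L d _ _
  unfold Spec_prob3
  exact main_eq s L d
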